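-- pv_equiv track=rewrite | github.com/Default-to-AI/openclaw-workspace | .openclaw/workspace/projects/Axe-Capital/step2-news/axe_news/pipeline.py | classify_relevance
-- ===== SOURCE A (Python) =====
-- from typing import Iterable, Literal
--
-- PortfolioRelevance = Literal["held", "watchlist", "sector", "none"]
--
-- def classify_relevance(
--     tickers: list[str],
--     held: set[str],
--     watchlist: set[str],
-- ) -> PortfolioRelevance:
--     if any(t in held for t in tickers):
--         return "held"
--     if any(t in watchlist for t in tickers):
--         return "watchlist"
--     if tickers:
--         return "sector"
--     return "none"
-- ===== SOURCE B (Python) =====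
-- def classify_relevance(tickers, held, watchlist):
--     watch = False
--     for t in tickers:
--         if t in held:
--             return "held"
--         if t in watchlist:
--             watch = True
--     if watch:
--         return "watchlist"
--     if tickers:
--         return "sector"
--     return "none"
-- ===== Notes on version B (the rewrite author's own statement) =====
-- stated objective: alternative
-- what changed: Fused A's two separate any() passes over tickers into one accumulating loop that returns 'held' immediately and records a watchlist hit in a flag, deciding 'watchlist'/'sector'/'none' after the single traversal.
import Mathlib
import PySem

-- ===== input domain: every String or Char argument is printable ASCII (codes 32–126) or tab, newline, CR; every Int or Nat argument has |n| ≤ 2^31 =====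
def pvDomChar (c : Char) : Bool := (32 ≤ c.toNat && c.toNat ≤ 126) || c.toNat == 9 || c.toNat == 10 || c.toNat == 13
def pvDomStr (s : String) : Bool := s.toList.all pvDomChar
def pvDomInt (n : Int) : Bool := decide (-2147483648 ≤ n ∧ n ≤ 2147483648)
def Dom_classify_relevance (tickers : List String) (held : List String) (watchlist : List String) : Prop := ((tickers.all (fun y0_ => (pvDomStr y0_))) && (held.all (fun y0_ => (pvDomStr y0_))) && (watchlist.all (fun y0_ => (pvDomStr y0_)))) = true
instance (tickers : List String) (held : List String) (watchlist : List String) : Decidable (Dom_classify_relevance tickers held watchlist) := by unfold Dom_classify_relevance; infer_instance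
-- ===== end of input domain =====

-- B fuses A's two any() passes into one loop with a watch flag; same result, different decomposition.

-- ===== PORT A =====
def classify_relevance (tickers : List String) (held : List String) (watchlist : List String) : String :=
  if tickers.any (fun t => held.contains t) then "held"
  else if tickers.any (fun t => watchlist.contains t) then "watchlist"
  else if tickers ≠ [] then "sector"
  else "none"

-- ===== PORT B =====
-- single loop over tickers: 'none' result = early-returned "held"; 'some w' = loop finished with watch flag w
def crLoop (held watchlist : List String) : List String → Bool → Option Bool
  | [], w => some w
  | t :: ts, w =>
    if held.contains t then none
    else crLoop held watchlist ts (w || watchlist.contains t)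

def classify_relevance_alt (tickers : List String) (held : List String) (watchlist : List String) : String :=
  match crLoop held watchlist tickers false with
  | none => "held"
  | some w =>
    if w then "watchlist"
    else if tickers ≠ [] then "sector"
    else "none"

-- ===== PRECONDITION & SPEC =====
def Spec_classify_relevance (tickers : List String) (held : List String) (watchlist : List String) (out : String) : Prop := out = classify_relevance_alt tickers held watchlist
instance (tickers : List String) (held : List String) (watchlist : List String) (out : String) : Decidable (Spec_classify_relevance tickers held watchlist out) := by unfold Spec_classify_relevance; infer_instance

-- ===== CLAIM (what is proved, stated in full; the proofs are below) =====
def Claim_equal_classify_relevance : Prop := ∀ (tickers : List String) (held : List String) (watchlist : List String), Dom_classify_relevance tickers held watchlist → Spec_classify_relevance tickers held watchlist (classify_relevance tickers held watchlist)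

-- ===== LEMMAS AND PROOFS =====
theorem crLoop_eq (held watchlist : List String) (ts : List String) :
    ∀ w, crLoop held watchlist ts w
      = if ts.any (fun t => held.contains t) then none
        else some (w || ts.any (fun t => watchlist.contains t)) := by
  induction ts with
  | nil => intro w; simp only [crLoop, List.any_nil, Bool.or_false, if_neg Bool.false_ne_true]
  | cons t ts ih =>
    intro w
    simp only [crLoop, List.any_cons]
    by_cases h : held.contains t
    · rw [if_pos h, if_pos (by rw [h, Bool.true_or])]
    · rw [if_neg h, ih, Bool.or_assoc]
      simp only [h, Bool.false_or]

-- ===== VERDICT (by name: the statement is the Claim_ definition above) =====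
theorem classify_relevance_spec : Claim_equal_classify_relevance := by
  intro tickers held watchlist _
  unfold Spec_classify_relevance classify_relevance classify_relevance_alt
  rw [crLoop_eq]
  by_cases h1 : tickers.any (fun t => held.contains t)
  · rw [if_pos h1, if_pos h1]
  · rw [if_neg h1, if_neg h1]
    simp only [Bool.false_or]
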